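-- pv_equiv track=rewrite | github.com/zariuq/ai-agents | megalodon/ramsey36/gen_adj17_proofs.py | gen_vertex_case_body
-- ===== SOURCE A (Python) =====
-- adj = {
--     0: [9, 14, 15, 16],
--     1: [7, 11, 13, 16],
--     2: [8, 10, 12, 15],
--     3: [6, 8, 13, 15, 16],
--     4: [5, 7, 12, 14, 16],
--     5: [4, 9, 10, 11, 13],
--     6: [3, 10, 11, 12, 14],
--     7: [1, 4, 9, 10, 15],
--     8: [2, 3, 9, 11, 14],
--     9: [0, 5, 7, 8, 12],
--     10: [2, 5, 6, 7, 16],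
--     11: [1, 5, 6, 8, 15],
--     12: [2, 4, 6, 9, 13],
--     13: [1, 3, 5, 12, 14],
--     14: [0, 4, 6, 8, 13],
--     15: [0, 2, 3, 7, 11],
--     16: [0, 1, 3, 4, 10],
-- }
--
-- def indent(text, prefix="  "):
--     """Indent a block of text."""
--     return "\n".join(prefix + line for line in text.splitlines())
--
-- def gen_recursive_neighbor_step(neighbors, v, hyp_name, i_var, j_var):
--     """Recursively generate proof steps for neighbor disjunction."""
--     lines = []
--     left_subset = neighbors[:-1]
--     left_pat = r" \/ ".join(f"{j_var} = {n}" for n in left_subset)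
--     lines.append(f"- assume HL: {left_pat}.")
--     if len(left_subset) > 1:
--         lines.append(f"  apply HL.")
--         lines.append(indent(gen_recursive_neighbor_step(left_subset, v, "HL", i_var, j_var), "  "))
--     else:
--         n = left_subset[0]
--         lines.append(f"  rewrite H{i_var}. rewrite HL.")
--         lines.append(f"  exact Adj17_{n}_{v}.")
--     right_n = neighbors[-1]
--     lines.append(f"- assume HR: {j_var} = {right_n}.")
--     lines.append(f"  rewrite H{i_var}. rewrite HR.")
--     lines.append(f"  exact Adj17_{right_n}_{v}.")
--     return "\n".join(lines)
--
-- def gen_vertex_case_body(v, hyp_name, i_var, j_var):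
--     """Generate the body of the proof for a specific vertex case."""
--     lines = []
--     lines.append(f"apply {hyp_name}.")
--     lines.append(f"assume H{i_var}: {i_var} = {v}.")
--     neighbor_disj = r" \/ ".join(f"{j_var} = {n}" for n in adj[v])
--     lines.append(f"assume H_neighbors: {neighbor_disj}.")
--     lines.append(f"apply H_neighbors.")
--     lines.append(gen_recursive_neighbor_step(adj[v], v, "H_neighbors", i_var, j_var))
--     return "\n".join(lines)
-- ===== SOURCE B (Python) =====
-- adj = {
--     0: [9, 14, 15, 16],
--     1: [7, 11, 13, 16],
--     2: [8, 10, 12, 15],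
--     3: [6, 8, 13, 15, 16],
--     4: [5, 7, 12, 14, 16],
--     5: [4, 9, 10, 11, 13],
--     6: [3, 10, 11, 12, 14],
--     7: [1, 4, 9, 10, 15],
--     8: [2, 3, 9, 11, 14],
--     9: [0, 5, 7, 8, 12],
--     10: [2, 5, 6, 7, 16],
--     11: [1, 5, 6, 8, 15],
--     12: [2, 4, 6, 9, 13],
--     13: [1, 3, 5, 12, 14],
--     14: [0, 4, 6, 8, 13],
--     15: [0, 2, 3, 7, 11],
--     16: [0, 1, 3, 4, 10],
-- }
--
-- def indent(text, prefix="  "):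
--     return "\n".join(prefix + line for line in text.splitlines())
--
-- def gen_vertex_case_body(v, hyp_name, i_var, j_var):
--     """Iterative (fold) version: build the innermost two-neighbor block first,
--     then wrap it once per remaining neighbor, left to right."""
--     ns = adj[v]
--     disj = lambda xs: r" \/ ".join(f"{j_var} = {n}" for n in xs)
--     def tail(n):
--         return [f"- assume HR: {j_var} = {n}.",
--                 f"  rewrite H{i_var}. rewrite HR.",
--                 f"  exact Adj17_{n}_{v}."]
--     a, b = ns[0], ns[1]
--     block = "\n".join([f"- assume HL: {j_var} = {a}.",
--                        f"  rewrite H{i_var}. rewrite HL.",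
--                        f"  exact Adj17_{a}_{v}."] + tail(b))
--     prev = [a, b]
--     for n in ns[2:]:
--         block = "\n".join([f"- assume HL: {disj(prev)}.",
--                            f"  apply HL.",
--                            indent(block, "  ")] + tail(n))
--         prev.append(n)
--     return "\n".join([f"apply {hyp_name}.",
--                       f"assume H{i_var}: {i_var} = {v}.",
--                       f"assume H_neighbors: {disj(ns)}.",
--                       f"apply H_neighbors.",
--                       block])
-- ===== Notes on version B (the rewrite author's own statement) =====
-- stated objective: alternative
-- what changed: The recursive gen_recursive_neighbor_step helper is replaced by an iterative fold: B builds the innermost two-neighbor proof block first, then wraps it once per remaining neighbor left-to-right (indent + HL/HR lines), with no recursion.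
import Mathlib
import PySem

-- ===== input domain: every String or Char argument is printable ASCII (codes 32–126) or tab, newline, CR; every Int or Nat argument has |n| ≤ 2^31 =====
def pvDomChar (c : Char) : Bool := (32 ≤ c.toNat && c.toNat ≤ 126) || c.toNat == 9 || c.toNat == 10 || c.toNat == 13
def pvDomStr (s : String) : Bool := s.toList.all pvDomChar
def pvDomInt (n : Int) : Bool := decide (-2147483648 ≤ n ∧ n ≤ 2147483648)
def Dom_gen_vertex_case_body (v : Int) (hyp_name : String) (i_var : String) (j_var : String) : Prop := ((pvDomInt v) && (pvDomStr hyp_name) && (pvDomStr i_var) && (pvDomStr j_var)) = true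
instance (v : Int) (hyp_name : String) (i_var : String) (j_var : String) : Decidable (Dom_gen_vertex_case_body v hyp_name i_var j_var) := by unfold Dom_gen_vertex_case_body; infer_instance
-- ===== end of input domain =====

-- B replaces the recursive neighbor-step generator by an iterative left-to-right fold that
-- wraps an innermost two-neighbor block; objective: alternative decomposition, same output.

-- ===== PORT A =====
-- module-level adj dict
def pvAdj : PySem.Dict Int (List Int) := PySem.Dict.ofList
  [(0, [9, 14, 15, 16]), (1, [7, 11, 13, 16]), (2, [8, 10, 12, 15]),
   (3, [6, 8, 13, 15, 16]), (4, [5, 7, 12, 14, 16]), (5, [4, 9, 10, 11, 13]),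
   (6, [3, 10, 11, 12, 14]), (7, [1, 4, 9, 10, 15]), (8, [2, 3, 9, 11, 14]),
   (9, [0, 5, 7, 8, 12]), (10, [2, 5, 6, 7, 16]), (11, [1, 5, 6, 8, 15]),
   (12, [2, 4, 6, 9, 13]), (13, [1, 3, 5, 12, 14]), (14, [0, 4, 6, 8, 13]),
   (15, [0, 2, 3, 7, 11]), (16, [0, 1, 3, 4, 10])]

-- indent(text, prefix): "\n".join(prefix + line for line in text.splitlines())
def pyIndent (text : String) (pre : String) : String :=
  PySem.Str.join "\n" ((PySem.Str.splitlines text).map (fun line => pre ++ line))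

-- r" \/ ".join(f"{j_var} = {n}" for n in xs)
def pvDisj (j_var : String) (xs : List Int) : String :=
  PySem.Str.join " \\/ " (xs.map (fun n => j_var ++ " = " ++ PySem.Int.toStr n))

-- gen_recursive_neighbor_step; neighbors[:-1] is List.dropLast (exact), neighbors[-1] is
-- getLast? (none = IndexError, unreachable under Pre_); the [] branches mark IndexError paths.
def genRecStep (neighbors : List Int) (v : Int) (hyp_name : String) (i_var : String) (j_var : String) : String :=
  -- left_subset = neighbors[:-1] = neighbors.dropLast, written inline for the termination proof
  let left_pat := pvDisj j_var neighbors.dropLast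
  let line1 := "- assume HL: " ++ left_pat ++ "."
  let mid :=
    if 1 < neighbors.dropLast.length then
      ["  apply HL.", pyIndent (genRecStep neighbors.dropLast v "HL" i_var j_var) "  "]
    else
      match neighbors.dropLast with
      | n :: _ =>
        ["  rewrite H" ++ i_var ++ ". rewrite HL.",
         "  exact Adj17_" ++ PySem.Int.toStr n ++ "_" ++ PySem.Int.toStr v ++ "."]
      | [] => []  -- Python raises IndexError here (outside Pre_)
  let last :=
    match neighbors.getLast? with
    | some r =>
      ["- assume HR: " ++ j_var ++ " = " ++ PySem.Int.toStr r ++ ".",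
       "  rewrite H" ++ i_var ++ ". rewrite HR.",
       "  exact Adj17_" ++ PySem.Int.toStr r ++ "_" ++ PySem.Int.toStr v ++ "."]
    | none => []  -- Python raises IndexError here (outside Pre_)
  PySem.Str.join "\n" (line1 :: (mid ++ last))
termination_by neighbors.length
decreasing_by
  rename_i hlen
  simp only [List.length_dropLast] at hlen ⊢
  omega

def gen_vertex_case_body (v : Int) (hyp_name : String) (i_var : String) (j_var : String) : String :=
  match PySem.Dict.get? pvAdj v with
  | none => ""  -- Python raises KeyError here (outside Pre_)
  | some ns =>
    PySem.Str.join "\n"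
      ["apply " ++ hyp_name ++ ".",
       "assume H" ++ i_var ++ ": " ++ i_var ++ " = " ++ PySem.Int.toStr v ++ ".",
       "assume H_neighbors: " ++ pvDisj j_var ns ++ ".",
       "apply H_neighbors.",
       genRecStep ns v "H_neighbors" i_var j_var]

-- ===== PORT B =====
-- tail(n) of Source B
def genTail (n : Int) (v : Int) (i_var : String) (j_var : String) : List String :=
  ["- assume HR: " ++ j_var ++ " = " ++ PySem.Int.toStr n ++ ".",
   "  rewrite H" ++ i_var ++ ". rewrite HR.",
   "  exact Adj17_" ++ PySem.Int.toStr n ++ "_" ++ PySem.Int.toStr v ++ "."]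

-- one iteration of Source B's for-loop: state is (prev, block)
def genFoldStep (v : Int) (i_var : String) (j_var : String) (st : List Int × String) (n : Int) : List Int × String :=
  (st.1 ++ [n],
   PySem.Str.join "\n"
     (["- assume HL: " ++ pvDisj j_var st.1 ++ ".",
       "  apply HL.",
       pyIndent st.2 "  "] ++ genTail n v i_var j_var))

def gen_vertex_case_body_alt (v : Int) (hyp_name : String) (i_var : String) (j_var : String) : String :=
  match PySem.Dict.get? pvAdj v with
  | none => ""  -- Python raises KeyError here (outside Pre_)
  | some ns =>
    match ns with
    | a :: b :: rest =>  -- a = ns[0], b = ns[1], rest = ns[2:]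
      let base := PySem.Str.join "\n"
        (["- assume HL: " ++ j_var ++ " = " ++ PySem.Int.toStr a ++ ".",
          "  rewrite H" ++ i_var ++ ". rewrite HL.",
          "  exact Adj17_" ++ PySem.Int.toStr a ++ "_" ++ PySem.Int.toStr v ++ "."] ++ genTail b v i_var j_var)
      let block := (rest.foldl (genFoldStep v i_var j_var) ([a, b], base)).2
      PySem.Str.join "\n"
        ["apply " ++ hyp_name ++ ".",
         "assume H" ++ i_var ++ ": " ++ i_var ++ " = " ++ PySem.Int.toStr v ++ ".",
         "assume H_neighbors: " ++ pvDisj j_var ns ++ ".",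
         "apply H_neighbors.",
         block]
    | _ => ""  -- Python raises IndexError here (outside Pre_)

-- ===== PRECONDITION & SPEC =====
-- Pre_ excludes exactly the v not in adj's keys 0..16, on which Python A raises KeyError.
def Pre_gen_vertex_case_body (v : Int) (hyp_name : String) (i_var : String) (j_var : String) : Prop :=
  0 ≤ v ∧ v ≤ 16
instance (v : Int) (hyp_name : String) (i_var : String) (j_var : String) : Decidable (Pre_gen_vertex_case_body v hyp_name i_var j_var) := by unfold Pre_gen_vertex_case_body; infer_instance

def pvWitness_gen_vertex_case_body : Int × String × String × String := (0, "H", "i", "j")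

def Spec_gen_vertex_case_body (v : Int) (hyp_name : String) (i_var : String) (j_var : String) (out : String) : Prop := out = gen_vertex_case_body_alt v hyp_name i_var j_var
instance (v : Int) (hyp_name : String) (i_var : String) (j_var : String) (out : String) : Decidable (Spec_gen_vertex_case_body v hyp_name i_var j_var out) := by unfold Spec_gen_vertex_case_body; infer_instance

-- ===== CLAIM =====
def Claim_equal_gen_vertex_case_body : Prop := ∀ (v : Int) (hyp_name : String) (i_var : String) (j_var : String), Dom_gen_vertex_case_body v hyp_name i_var j_var → Pre_gen_vertex_case_body v hyp_name i_var j_var → Spec_gen_vertex_case_body v hyp_name i_var j_var (gen_vertex_case_body v hyp_name i_var j_var)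

-- ===== LEMMAS AND PROOFS =====

-- genRecStep never reads hyp_name (the recursion passes the literal "HL")
theorem genRecStep_hyp (ns : List Int) (v : Int) (h h' i j : String) :
    genRecStep ns v h i j = genRecStep ns v h' i j := by
  conv_lhs => rw [genRecStep.eq_def]
  conv_rhs => rw [genRecStep.eq_def]

theorem genRecStep_pair (a b v : Int) (h i j : String) :
    genRecStep [a, b] v h i j =
      PySem.Str.join "\n"
        (["- assume HL: " ++ j ++ " = " ++ PySem.Int.toStr a ++ ".",
          "  rewrite H" ++ i ++ ". rewrite HL.",
          "  exact Adj17_" ++ PySem.Int.toStr a ++ "_" ++ PySem.Int.toStr v ++ "."] ++ genTail b v i j) := by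
  rw [genRecStep.eq_def]
  simp [genTail, pvDisj, PySem.Str.join]

theorem genRecStep_concat (p : List Int) (n v : Int) (h i j : String) (hp : 2 ≤ p.length) :
    genRecStep (p ++ [n]) v h i j =
      PySem.Str.join "\n"
        (["- assume HL: " ++ pvDisj j p ++ ".",
          "  apply HL.",
          pyIndent (genRecStep p v "HL" i j) "  "] ++ genTail n v i j) := by
  rw [genRecStep.eq_def]
  simp only [List.dropLast_concat, List.getLast?_concat]
  rw [if_pos (by omega)]
  simp [genTail]

theorem fold_inv (v : Int) (i j : String) :
    ∀ (rest p : List Int), 2 ≤ p.length →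
      rest.foldl (genFoldStep v i j) (p, genRecStep p v "HL" i j) =
        (p ++ rest, genRecStep (p ++ rest) v "HL" i j) := by
  intro rest
  induction rest with
  | nil => intro p hp; simp
  | cons n rs ih =>
    intro p hp
    have h1 : genFoldStep v i j (p, genRecStep p v "HL" i j) n
        = (p ++ [n], genRecStep (p ++ [n]) v "HL" i j) := by
      simp [genFoldStep, genRecStep_concat p n v "HL" i j hp]
    rw [List.foldl_cons, h1, ih (p ++ [n]) (by simp; omega)]
    simp

theorem main_eq (v : Int) (h i j : String) (a b : Int) (rest : List Int)
    (hd : PySem.Dict.get? pvAdj v = some (a :: b :: rest)) :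
    gen_vertex_case_body v h i j = gen_vertex_case_body_alt v h i j := by
  unfold gen_vertex_case_body gen_vertex_case_body_alt
  rw [hd]
  dsimp only
  have hbase := (genRecStep_pair a b v "HL" i j).symm
  have hfold := fold_inv v i j rest [a, b] (by simp)
  rw [hbase, hfold]
  simp only [List.cons_append, List.nil_append]
  rw [genRecStep_hyp (a :: b :: rest) v "HL" "H_neighbors" i j]

-- ===== VERDICT =====
theorem gen_vertex_case_body_spec : Claim_equal_gen_vertex_case_body := by
  unfold Claim_equal_gen_vertex_case_body
  intro v h i j _ hpre
  unfold Spec_gen_vertex_case_body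
  obtain ⟨h1, h2⟩ := hpre
  interval_cases v
  · exact main_eq _ h i j 9 14 [15, 16] (by rfl)
  · exact main_eq _ h i j 7 11 [13, 16] (by rfl)
  · exact main_eq _ h i j 8 10 [12, 15] (by rfl)
  · exact main_eq _ h i j 6 8 [13, 15, 16] (by rfl)
  · exact main_eq _ h i j 5 7 [12, 14, 16] (by rfl)
  · exact main_eq _ h i j 4 9 [10, 11, 13] (by rfl)
  · exact main_eq _ h i j 3 10 [11, 12, 14] (by rfl)
  · exact main_eq _ h i j 1 4 [9, 10, 15] (by rfl)
  · exact main_eq _ h i j 2 3 [9, 11, 14] (by rfl)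
  · exact main_eq _ h i j 0 5 [7, 8, 12] (by rfl)
  · exact main_eq _ h i j 2 5 [6, 7, 16] (by rfl)
  · exact main_eq _ h i j 1 5 [6, 8, 15] (by rfl)
  · exact main_eq _ h i j 2 4 [6, 9, 13] (by rfl)
  · exact main_eq _ h i j 1 3 [5, 12, 14] (by rfl)
  · exact main_eq _ h i j 0 4 [6, 8, 13] (by rfl)
  · exact main_eq _ h i j 0 2 [3, 7, 11] (by rfl)
  · exact main_eq _ h i j 0 1 [3, 4, 10] (by rfl)
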